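-- pv_equiv track=rewrite | github.com/MaximeRedstone/UnstructuredCAE-DA | AEs/AE_Base.py | get_list_AE_layers
-- ===== SOURCE A (Python) =====
-- def get_list_AE_layers(input_size, latent_dim, hidden):
--     """Helper function to get a list of the number of fc nodes or conv
--     channels in an autoencoder"""
--     #create a list of all dimension sizes (including input/output)
--     layers = [input_size]
--     #encoder:
--     for size in hidden:
--         layers.append(size)
--     #latent representation:
--     layers.append(latent_dim)
--     #decoder:
--     for size in hidden[::-1]: #reversed list
--         layers.append(size)
--     layers.append(input_size)
--
--     return layers
-- ===== SOURCE B (Python) =====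
-- def get_list_AE_layers(input_size, latent_dim, hidden):
--     """Closed-form construction: the output is determined index-by-index.
--     Output has length 2*m+1 where m = len(hidden)+1 is the latent position;
--     element i is found by reflecting i around m and reading off the encoder."""
--     h = list(hidden)
--     m = len(h) + 1
--
--     def layer(i):
--         j = min(i, 2 * m - i)  # reflect around the latent position
--         if j == 0:
--             return input_size
--         if j == m:
--             return latent_dim
--         return h[j - 1]
--
--     return [layer(i) for i in range(2 * m + 1)]
-- ===== Notes on version B (the rewrite author's own statement) =====
-- stated objective: alternative
-- what changed: Replaces the two append loops with a closed-form construction: the output of length 2*(len(hidden)+1)+1 is generated index-by-index, each element computed by reflecting its index around the latent position, so no list is grown, reversed or concatenated.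
import Mathlib
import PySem

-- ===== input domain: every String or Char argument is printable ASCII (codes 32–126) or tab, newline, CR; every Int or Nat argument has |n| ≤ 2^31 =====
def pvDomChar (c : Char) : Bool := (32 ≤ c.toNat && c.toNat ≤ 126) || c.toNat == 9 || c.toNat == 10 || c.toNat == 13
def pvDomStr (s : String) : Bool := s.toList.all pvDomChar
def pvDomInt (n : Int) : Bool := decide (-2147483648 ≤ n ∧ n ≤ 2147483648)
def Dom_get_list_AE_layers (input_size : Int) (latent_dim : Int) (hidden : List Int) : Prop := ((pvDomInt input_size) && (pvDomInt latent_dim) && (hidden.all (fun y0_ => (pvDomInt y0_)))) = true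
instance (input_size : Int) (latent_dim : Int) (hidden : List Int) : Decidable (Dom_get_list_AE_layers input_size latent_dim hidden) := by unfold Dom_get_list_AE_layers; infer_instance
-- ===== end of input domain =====

-- B generates the layer list index-by-index from a closed-form reflection around the latent position (alternative algorithm); A and B proved equal on all inputs.


-- ===== PORT A =====
def get_list_AE_layers (input_size : Int) (latent_dim : Int) (hidden : List Int) : List Int :=
  let layers := [input_size]
  let layers := hidden.foldl (fun acc size => acc ++ [size]) layers
  let layers := layers ++ [latent_dim]
  -- hidden[::-1]: slice? with step -1 never fails (step ≠ 0), so getD [] is exact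
  let layers := ((PySem.List.slice? hidden none none (-1)).getD []).foldl (fun acc size => acc ++ [size]) layers
  layers ++ [input_size]

-- ===== PORT B =====
-- B: closed-form, index-by-index; h[j - 1] is always in range for 0 ≤ i ≤ 2*m, so pyGetD with a default is exact
def get_list_AE_layers_alt (input_size : Int) (latent_dim : Int) (hidden : List Int) : List Int :=
  let h := hidden
  let m : Int := (h.length : Int) + 1
  let layer := fun (i : Int) =>
    let j := min i (2 * m - i)
    if j = 0 then input_size
    else if j = m then latent_dim
    else PySem.List.pyGetD h (j - 1) 0
  (PySem.List.pyRange 0 (2 * m + 1) 1).map layer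

-- ===== PRECONDITION & SPEC =====
def Spec_get_list_AE_layers (input_size : Int) (latent_dim : Int) (hidden : List Int) (out : List Int) : Prop := out = get_list_AE_layers_alt input_size latent_dim hidden
instance (input_size : Int) (latent_dim : Int) (hidden : List Int) (out : List Int) : Decidable (Spec_get_list_AE_layers input_size latent_dim hidden out) := by unfold Spec_get_list_AE_layers; infer_instance

-- ===== CLAIM (what is proved, stated in full; the proofs are below) =====
def Claim_equal_get_list_AE_layers : Prop := ∀ (input_size : Int) (latent_dim : Int) (hidden : List Int), Dom_get_list_AE_layers input_size latent_dim hidden → Spec_get_list_AE_layers input_size latent_dim hidden (get_list_AE_layers input_size latent_dim hidden)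

-- ===== LEMMAS AND PROOFS =====
lemma pv_foldl_app (l acc : List Int) : l.foldl (fun a s => a ++ [s]) acc = acc ++ l := by
  induction l generalizing acc with
  | nil => simp
  | cons x xs ih => simp [List.foldl, ih]

-- element k of A's palindromic list equals B's reflection formula at index k
lemma pv_pal_get (inS lat : Int) (h : List Int) (k : Nat) (hk : k < 2*h.length+3) :
    ([inS] ++ h ++ [lat] ++ h.reverse ++ [inS])[k]'(by simp; omega) =
      (if min (k:Int) (2 * ((h.length:Int) + 1) - k) = 0 then inS
       else if min (k:Int) (2 * ((h.length:Int) + 1) - k) = (h.length:Int) + 1 then lat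
       else PySem.List.pyGetD h (min (k:Int) (2 * ((h.length:Int) + 1) - k) - 1) 0) := by
  simp only [List.append_assoc, List.singleton_append]
  by_cases h1 : k < (inS :: h).length
  · rw [List.getElem_append_left h1]
    rcases Nat.eq_zero_or_pos k with rfl | hpos
    · rw [if_pos (by omega)]; rfl
    · obtain ⟨k', rfl⟩ : ∃ k', k = k' + 1 := ⟨k - 1, by omega⟩
      have he : k' < h.length := by simpa using h1
      rw [List.getElem_cons_succ, if_neg (by omega), if_neg (by omega)]
      have hj : min ((k'+1:Nat):Int) (2 * ((h.length:Int) + 1) - ((k'+1:Nat):Int)) - 1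
          = ((k':Nat):Int) := by omega
      rw [hj, PySem.List.pyGetD_natCast, List.getD_eq_getElem h 0 he]
  · rw [List.getElem_append_right (by omega)]
    obtain ⟨d, rfl⟩ : ∃ d, k = h.length + 1 + d := ⟨k - h.length - 1, by simp at h1; omega⟩
    have hdx : h.length + 1 + d - (inS :: h).length = d := by simp
    rw [getElem_congr_idx hdx]
    by_cases h2 : d < (lat :: h.reverse).length
    · rw [List.getElem_append_left h2]
      rcases Nat.eq_zero_or_pos d with rfl | hdpos
      · rw [if_neg (by omega), if_pos (by omega)]; rfl
      · obtain ⟨d', rfl⟩ : ∃ d', d = d' + 1 := ⟨d - 1, by omega⟩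
        have hd : d' < h.length := by simpa using h2
        rw [List.getElem_cons_succ, List.getElem_reverse,
          if_neg (by omega), if_neg (by omega)]
        have hj : min ((h.length + 1 + (d'+1) : Nat):Int)
            (2 * ((h.length:Int) + 1) - ((h.length + 1 + (d'+1) : Nat):Int)) - 1
            = ((h.length - 1 - d' : Nat):Int) := by omega
        rw [hj, PySem.List.pyGetD_natCast, List.getD_eq_getElem h 0 (by omega)]
    · have hdl : d = h.length + 1 := by simp at h2 ⊢; omega
      subst hdl
      rw [List.getElem_append_right (by simp), if_pos (by omega)]
      simp

-- ===== VERDICT (by name: the statement is the Claim_ definition above) =====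
theorem get_list_AE_layers_spec : Claim_equal_get_list_AE_layers := by
  intro input_size latent_dim hidden _
  unfold Spec_get_list_AE_layers get_list_AE_layers get_list_AE_layers_alt
  simp only [pv_foldl_app, PySem.List.slice?_none_none_neg_one, Option.getD_some,
    PySem.List.pyRange_one, List.map_map]
  apply List.ext_getElem
  · simp; omega
  · intro k hk1 hk2
    rw [List.getElem_map, List.getElem_range]
    simp only [Function.comp_apply, zero_add]
    have hk : k < 2 * hidden.length + 3 := by simp at hk1; omega
    exact pv_pal_get input_size latent_dim hidden k hk
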